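-- pv_equiv track=rewrite | github.com/andrew-peters/python-projects | algos/zigZag.py | solution
-- ===== SOURCE A (Python) =====
-- def solution(numbers):
--     resArr = []
--     idx = 0
--     length = len(numbers)
--     while idx < length - 2:
--         if numbers[idx + 1] > numbers[idx] and numbers[idx + 1] > numbers[idx + 2]:
--             resArr.append(1)
--         elif numbers[idx + 1] < numbers[idx] and numbers[idx + 1] < numbers[idx + 2]:
--             resArr.append(1)
--         else:
--             resArr.append(0)
--         idx += 1
--     return resArr
-- ===== SOURCE B (Python) =====
-- def solution(numbers):
--     d = [b - a for a, b in zip(numbers, numbers[1:])]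
--     return [1 if x * y < 0 else 0 for x, y in zip(d, d[1:])]
-- ===== Notes on version B (the rewrite author's own statement) =====
-- stated objective: alternative
-- what changed: B first builds a table of adjacent differences and then marks each pair of consecutive differences with strictly opposite signs (product < 0), instead of A's while loop testing four-way index comparisons per triple.
import Mathlib
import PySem

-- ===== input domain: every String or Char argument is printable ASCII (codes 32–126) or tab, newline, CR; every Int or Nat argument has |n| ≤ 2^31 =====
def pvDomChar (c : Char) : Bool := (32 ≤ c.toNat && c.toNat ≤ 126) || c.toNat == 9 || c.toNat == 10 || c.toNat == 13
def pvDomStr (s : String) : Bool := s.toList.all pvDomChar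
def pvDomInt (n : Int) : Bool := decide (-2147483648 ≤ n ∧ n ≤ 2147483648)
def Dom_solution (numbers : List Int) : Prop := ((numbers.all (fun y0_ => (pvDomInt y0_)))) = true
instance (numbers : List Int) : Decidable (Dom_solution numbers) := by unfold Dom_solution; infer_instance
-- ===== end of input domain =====

-- B builds a differences table and marks opposite-sign adjacent pairs; alternative decomposition, same cost.
-- ===== PORT A =====
-- the while loop of A: emits one entry per idx, idx from `idx` up to length-2
def solutionGo (numbers : List Int) (idx : Nat) : List Int :=
  if _h : idx < numbers.length - 2 then
    (if numbers.getD (idx + 1) 0 > numbers.getD idx 0 ∧ numbers.getD (idx + 1) 0 > numbers.getD (idx + 2) 0 then (1 : Int)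
     else if numbers.getD (idx + 1) 0 < numbers.getD idx 0 ∧ numbers.getD (idx + 1) 0 < numbers.getD (idx + 2) 0 then 1
     else 0) :: solutionGo numbers (idx + 1)
  else []
termination_by numbers.length - 2 - idx

def solution (numbers : List Int) : List Int := solutionGo numbers 0

-- ===== PORT B =====
def solution_alt (numbers : List Int) : List Int :=
  let d := (numbers.zip numbers.tail).map (fun p => p.2 - p.1)
  (d.zip d.tail).map (fun p => if p.1 * p.2 < 0 then (1 : Int) else 0)

-- ===== PRECONDITION & SPEC =====
def Spec_solution (numbers : List Int) (out : List Int) : Prop := out = solution_alt numbers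
instance (numbers : List Int) (out : List Int) : Decidable (Spec_solution numbers out) := by unfold Spec_solution; infer_instance

-- ===== CLAIM (what is proved, stated in full; the proofs are below) =====
def Claim_equal_solution : Prop := ∀ (numbers : List Int), Dom_solution numbers → Spec_solution numbers (solution numbers)

-- ===== LEMMAS AND PROOFS =====

-- ===== VERDICT (by name: the statement is the Claim_ definition above) =====
theorem len_go (numbers : List Int) (idx : Nat) :
    (solutionGo numbers idx).length = numbers.length - 2 - idx := by
  unfold solutionGo
  split
  · rw [List.length_cons, len_go]
    omega
  · simp; omega
termination_by numbers.length - 2 - idx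

theorem go_getElem (numbers : List Int) (idx i : Nat) (h : i < (solutionGo numbers idx).length) :
    (solutionGo numbers idx)[i] =
      (if numbers.getD (idx + i + 1) 0 > numbers.getD (idx + i) 0 ∧ numbers.getD (idx + i + 1) 0 > numbers.getD (idx + i + 2) 0 then (1 : Int)
       else if numbers.getD (idx + i + 1) 0 < numbers.getD (idx + i) 0 ∧ numbers.getD (idx + i + 1) 0 < numbers.getD (idx + i + 2) 0 then 1
       else 0) := by
  rw [len_go] at h
  have he : solutionGo numbers idx =
      (if numbers.getD (idx + 1) 0 > numbers.getD idx 0 ∧ numbers.getD (idx + 1) 0 > numbers.getD (idx + 2) 0 then (1 : Int)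
       else if numbers.getD (idx + 1) 0 < numbers.getD idx 0 ∧ numbers.getD (idx + 1) 0 < numbers.getD (idx + 2) 0 then 1
       else 0) :: solutionGo numbers (idx + 1) := by
    rw [solutionGo, dif_pos (by omega : idx < numbers.length - 2)]
  simp only [he]
  cases i with
  | zero => simp
  | succ j =>
    rw [List.getElem_cons_succ, go_getElem]
    ring_nf
termination_by numbers.length - 2 - idx

theorem sign_iff (a b c : Int) :
    ((b - a) * (c - b) < 0) ↔ ((b > a ∧ b > c) ∨ (b < a ∧ b < c)) := by
  constructor
  · intro h
    rcases mul_neg_iff.mp h with ⟨h1, h2⟩ | ⟨h1, h2⟩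
    · left; omega
    · right; omega
  · rintro (⟨h1, h2⟩ | ⟨h1, h2⟩) <;> apply mul_neg_iff.mpr
    · left; constructor <;> omega
    · right; constructor <;> omega

theorem triple_eq (a b c : Int) :
    (if b > a ∧ b > c then (1 : Int) else if b < a ∧ b < c then 1 else 0) =
      (if (b - a) * (c - b) < 0 then 1 else 0) := by
  by_cases h : (b - a) * (c - b) < 0
  · rw [if_pos h]
    rcases (sign_iff a b c).mp h with h' | h'
    · rw [if_pos h']
    · rw [if_neg (by omega), if_pos h']
  · rw [if_neg h]
    have hn : ¬ ((b > a ∧ b > c) ∨ (b < a ∧ b < c)) := fun hx => h ((sign_iff a b c).mpr hx)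
    rw [if_neg (by tauto), if_neg (by tauto)]

theorem solution_spec : Claim_equal_solution := by
  intro numbers _
  unfold Spec_solution solution solution_alt
  apply List.ext_getElem
  · rw [len_go]
    simp [List.length_zip, List.length_tail, List.length_map]
    omega
  · intro i h1 h2
    rw [go_getElem]
    simp only [Nat.zero_add]
    simp only [List.getElem_map, List.getElem_zip, List.getElem_tail]
    simp only [List.length_map, List.length_zip, List.length_tail] at h2
    have hi : i + 2 < numbers.length := by omega
    have g0 : numbers.getD i 0 = numbers[i]'(by omega) := List.getD_eq_getElem _ _ (by omega)
    have g1 : numbers.getD (i + 1) 0 = numbers[i+1]'(by omega) := List.getD_eq_getElem _ _ (by omega)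
    have g2 : numbers.getD (i + 2) 0 = numbers[i+2]'hi := List.getD_eq_getElem _ _ (by omega)
    rw [g0, g1, g2]
    exact triple_eq (numbers[i]'(by omega)) (numbers[i+1]'(by omega)) (numbers[i+2]'hi)
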